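-- pv_equiv track=rewrite | github.com/lkj10/algorithm-study | insun/scovil.py | solution
-- ===== SOURCE A (Python) =====
-- def solution(scoville, K):
--     answer = 0
--
--     # min은 n..
--     # while 문 -> n^2
--     while min(scoville) < K:
--         # break 조건: 스코빌 지수가 하나 남고
--         # K보다 작으면 -1  n^2 이넘음....1,000,000,000
--         if len(scoville) == 1 and scoville[0] < K:
--             return -1
--         # sorted >> nlogn
--         scoville = sorted(scoville, reverse=True)
--
--         scoville.append(scoville.pop() + scoville.pop() * 2)
--
--         answer += 1
--
--     return answer
-- ===== SOURCE B (Python) =====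
-- def insert_sorted(s, v):
--     # insert v into ascending-sorted s, keeping it sorted
--     if not s or v < s[0]:
--         return [v] + s
--     return [s[0]] + insert_sorted(s[1:], v)
--
--
-- def solution(scoville, K):
--     # Sort once ascending, then keep the list sorted by a single ordered
--     # insert per round instead of re-sorting the whole list every round.
--     s = sorted(scoville)
--     count = 0
--     while s[0] < K:
--         if len(s) == 1:
--             return -1
--         s = insert_sorted(s[2:], s[0] + 2 * s[1])
--         count += 1
--     return count
-- ===== Notes on version B (the rewrite author's own statement) =====
-- stated objective: faster
-- what changed: Instead of re-sorting the whole list descending and popping from the end on every round, B sorts once ascending and thereafter does a single ordered insert of the combined value per round, taking the two smallest from the front.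
import Mathlib
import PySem

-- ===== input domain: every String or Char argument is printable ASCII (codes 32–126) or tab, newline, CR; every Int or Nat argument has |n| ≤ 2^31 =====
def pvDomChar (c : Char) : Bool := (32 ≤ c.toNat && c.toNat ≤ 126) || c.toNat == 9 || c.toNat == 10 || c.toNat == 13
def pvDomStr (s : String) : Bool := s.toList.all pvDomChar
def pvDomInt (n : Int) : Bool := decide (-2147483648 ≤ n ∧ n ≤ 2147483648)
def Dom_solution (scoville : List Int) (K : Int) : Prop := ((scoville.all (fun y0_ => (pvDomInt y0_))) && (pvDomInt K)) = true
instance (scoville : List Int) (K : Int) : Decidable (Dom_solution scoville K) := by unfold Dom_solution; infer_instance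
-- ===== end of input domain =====

-- B sorts once ascending and does one ordered insert per round, instead of A's
-- full descending re-sort every round (objective: faster by a better per-round step).

-- ===== PORT A =====
def solutionGo : Nat → List Int → Int → Int → Int
  | 0, _, _, answer => answer
  | fuel+1, scoville, K, answer =>
    match PySem.List.min? scoville (fun x => x) with
    | none => answer      -- Python: min([]) raises ValueError; excluded by Pre_solution
    | some m =>
      if m < K then
        if scoville.length = 1 ∧ PySem.List.pyGetD scoville 0 0 < K then
          -1
        else
          let s := PySem.List.sorted scoville (fun x => x) true
          match PySem.List.pop? s (-1) with
          | none => answer      -- unreachable: s ≠ [] here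
          | some (a, s1) =>
            match PySem.List.pop? s1 (-1) with
            | none => answer    -- unreachable: len ≥ 2 here
            | some (b, s2) =>
              solutionGo fuel (s2 ++ [a + b * 2]) K (answer + 1)
      else answer

def solution (scoville : List Int) (K : Int) : Int :=
  solutionGo scoville.length scoville K 0

-- ===== PORT B =====
def insertSorted : List Int → Int → List Int
  | [], v => [v]
  | x :: t, v => if v < x then v :: x :: t else x :: insertSorted t v

def solutionAltGo : Nat → List Int → Int → Int → Int
  | 0, _, _, count => count
  | fuel+1, s, K, count =>
    match s with
    | [] => count        -- Python: s[0] raises IndexError; excluded by Pre_solution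
    | x :: t =>
      if x < K then
        match t with
        | [] => -1
        | b :: rest => solutionAltGo fuel (insertSorted rest (x + 2 * b)) K (count + 1)
      else count

def solution_alt (scoville : List Int) (K : Int) : Int :=
  solutionAltGo scoville.length (PySem.List.sorted scoville (fun x => x) false) K 0

-- ===== PRECONDITION & SPEC =====
-- Pre_ excludes only the empty list, on which both A and B raise (ValueError / IndexError).
def Pre_solution (scoville : List Int) (K : Int) : Prop := scoville ≠ []
instance (scoville : List Int) (K : Int) : Decidable (Pre_solution scoville K) := by unfold Pre_solution; infer_instance
def pvWitness_solution : List Int × Int := ([1, 2, 3, 9, 10, 12], 7)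

def Spec_solution (scoville : List Int) (K : Int) (out : Int) : Prop := out = solution_alt scoville K
instance (scoville : List Int) (K : Int) (out : Int) : Decidable (Spec_solution scoville K out) := by unfold Spec_solution; infer_instance

-- ===== CLAIM (what is proved, stated in full; the proofs are below) =====
def Claim_equal_solution : Prop := ∀ (scoville : List Int) (K : Int), Dom_solution scoville K → Pre_solution scoville K → Spec_solution scoville K (solution scoville K)

-- ===== LEMMAS AND PROOFS =====

theorem insertSorted_perm (s : List Int) (v : Int) : (insertSorted s v).Perm (v :: s) := by
  induction s with
  | nil => simp [insertSorted]
  | cons x t ih =>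
    simp only [insertSorted]
    split
    · exact List.Perm.refl _
    · exact (ih.cons x).trans (List.Perm.swap v x t)

theorem mem_insertSorted {y : Int} {s : List Int} {v : Int} (h : y ∈ insertSorted s v) :
    y = v ∨ y ∈ s := by
  have := (insertSorted_perm s v).mem_iff.mp h
  simpa using this

theorem insertSorted_pairwise {s : List Int} (v : Int)
    (h : s.Pairwise (· ≤ ·)) : (insertSorted s v).Pairwise (· ≤ ·) := by
  induction s with
  | nil => simp [insertSorted]
  | cons x t ih =>
    rcases List.pairwise_cons.mp h with ⟨hx, ht⟩
    simp only [insertSorted]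
    split
    · rename_i hvx
      refine List.pairwise_cons.mpr ⟨?_, h⟩
      intro y hy
      rcases List.mem_cons.mp hy with rfl | hy
      · exact le_of_lt hvx
      · exact le_trans (le_of_lt hvx) (hx _ hy)
    · rename_i hvx
      refine List.pairwise_cons.mpr ⟨?_, ih ht⟩
      intro y hy
      rcases mem_insertSorted hy with rfl | hy
      · omega
      · exact hx _ hy

theorem sorted_desc_eq_reverse (L : List Int) :
    PySem.List.sorted L (fun x => x) true = (PySem.List.sorted L (fun x => x) false).reverse := by
  apply PySem.List.eq_of_perm_of_pairwise_le_of_injective (fun x : Int => -x)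
    (fun a b h => by simpa using h)
  · exact (PySem.List.sorted_perm L (fun x => x) true).trans
      ((PySem.List.sorted_perm L (fun x => x) false).symm.trans (List.reverse_perm _).symm)
  · exact (PySem.List.sorted_pairwise_rev L (fun x => x)).imp (by intro a b h; omega)
  · exact (List.pairwise_reverse.mpr
      ((PySem.List.sorted_pairwise L (fun x => x)).imp (by intro a b h; omega)))

theorem sorted_rev_append_singleton {rest : List Int} {v : Int}
    (h : rest.Pairwise (· ≤ ·)) :
    PySem.List.sorted (rest.reverse ++ [v]) (fun x => x) false = insertSorted rest v := by
  apply PySem.List.sorted_id_eq_of_perm_of_pairwise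
  · exact (insertSorted_perm rest v).trans
      ((List.perm_append_singleton v rest.reverse).trans ((rest.reverse_perm).cons v)).symm
  · exact insertSorted_pairwise v h

theorem head_sorted_eq_min {L : List Int} {m x : Int} {t : List Int}
    (hm : PySem.List.min? L (fun x => x) = some m)
    (hs : PySem.List.sorted L (fun x => x) false = x :: t) : m = x := by
  have hmem : m ∈ L := PySem.List.min?_mem hm
  have hxmem : x ∈ L := by
    have : x ∈ PySem.List.sorted L (fun x => x) false := by simp [hs]
    exact (PySem.List.mem_sorted _ _ _ _).mp this
  have h1 : m ≤ x := PySem.List.min?_isMin hm x hxmem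
  have h2 : x ≤ m := PySem.List.key_head_sorted_le L (fun x => x) hs m hmem
  omega

theorem go_eq (fuel : Nat) (L : List Int) (K ans : Int) :
    solutionGo fuel L K ans = solutionAltGo fuel (PySem.List.sorted L (fun x => x) false) K ans := by
  induction fuel generalizing L ans with
  | zero => rfl
  | succ fuel ih =>
    rcases hL : PySem.List.sorted L (fun x => x) false with _ | ⟨x, t⟩
    · -- L is empty: both sides return the accumulator
      have hnil : L = [] := by
        have := (PySem.List.sorted_eq_nil_iff L (fun x => x) false).mp hL
        exact this
      subst hnil
      simp [solutionGo, solutionAltGo, PySem.List.min?]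
    · -- L nonempty, ascending sort is x :: t
      have hLne : L ≠ [] := by
        intro h; subst h
        simp [PySem.List.sorted] at hL
      obtain ⟨m, hm⟩ : ∃ m, PySem.List.min? L (fun x => x) = some m := by
        cases h : PySem.List.min? L (fun x => x) with
        | none => exact absurd ((PySem.List.min?_eq_none_iff L (fun x => x)).mp h) hLne
        | some m => exact ⟨m, rfl⟩
      have hmx : m = x := head_sorted_eq_min hm hL
      subst hmx
      simp only [solutionGo, solutionAltGo, hm]
      by_cases hK : m < K
      · simp only [if_pos hK]
        cases t with
        | nil =>
          -- one element left and it is below K: both return -1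
          have hlen : L.length = 1 := by
            have := PySem.List.length_sorted L (fun x => x) false
            rw [hL] at this; simpa using this.symm
          obtain ⟨c, hc⟩ : ∃ c, L = [c] := by
            cases L with
            | nil => simp at hlen
            | cons a l => cases l with
              | nil => exact ⟨a, rfl⟩
              | cons b l' => simp at hlen
          have hcx : c = m := by
            have : PySem.List.sorted [c] (fun x => x) false = [c] :=
              PySem.List.sorted_eq_self_of_pairwise [c] (fun x => x) (by simp)
            rw [hc, this] at hL
            exact (List.cons.injEq _ _ _ _).mp hL |>.1
          subst hc; subst hcx
          simp [PySem.List.pyGetD, hK]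
        | cons b rest =>
          -- at least two elements: one combining round, then the IH
          have hlen : L.length = rest.length + 2 := by
            have := PySem.List.length_sorted L (fun x => x) false
            rw [hL] at this; simpa using this.symm
          have hguard : ¬(L.length = 1 ∧ PySem.List.pyGetD L 0 0 < K) := by
            intro h; omega
          simp only [if_neg hguard]
          have hs : PySem.List.sorted L (fun x => x) true
              = (rest.reverse ++ [b]) ++ [m] := by
            rw [sorted_desc_eq_reverse, hL]; simp
          rw [hs]
          simp only [PySem.List.pop?_last]
          have hrest : rest.Pairwise (· ≤ ·) := by
            have := PySem.List.sorted_pairwise L (fun x => x)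
            rw [hL] at this
            exact (List.pairwise_cons.mp (List.pairwise_cons.mp this).2).2
          have hval : m + b * 2 = m + 2 * b := by ring
          rw [ih, hval, sorted_rev_append_singleton hrest]
      · simp only [if_neg hK]

-- ===== VERDICT (by name: the statement is the Claim_ definition above) =====
theorem solution_spec : Claim_equal_solution := by
  intro scoville K _ _
  unfold Spec_solution solution solution_alt
  rw [go_eq]
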